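-- pv_equiv track=rewrite | github.com/RamPanic/Netdump | core/frames/tcp.py | convert_to_flags_readable
-- ===== SOURCE A (Python) =====
-- def convert_to_flags_readable(raw_flags):
--
--     bits_string = format(raw_flags & 0x003f, "06b")
--
--     bits = [ int(bit) for bit in bits_string ]
--
--     return {
--
--         "URG": bits[0],
--         "ACK": bits[1],
--         "PSH": bits[2],
--         "RST": bits[3],
--         "SYN": bits[4],
--         "FIN": bits[5]
--
--     }
-- ===== SOURCE B (Python) =====
-- def convert_to_flags_readable(raw_flags):
--     f = raw_flags & 0x3F
--     return {
--         "URG": (f >> 5) & 1,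
--         "ACK": (f >> 4) & 1,
--         "PSH": (f >> 3) & 1,
--         "RST": (f >> 2) & 1,
--         "SYN": (f >> 1) & 1,
--         "FIN": f & 1,
--     }
-- ===== Notes on version B (the rewrite author's own statement) =====
-- stated objective: simpler
-- what changed: Replaced the format-to-binary-string-then-parse-each-character approach with direct shift-and-mask bit arithmetic on the masked flag byte; no string or list is built.
import Mathlib
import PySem

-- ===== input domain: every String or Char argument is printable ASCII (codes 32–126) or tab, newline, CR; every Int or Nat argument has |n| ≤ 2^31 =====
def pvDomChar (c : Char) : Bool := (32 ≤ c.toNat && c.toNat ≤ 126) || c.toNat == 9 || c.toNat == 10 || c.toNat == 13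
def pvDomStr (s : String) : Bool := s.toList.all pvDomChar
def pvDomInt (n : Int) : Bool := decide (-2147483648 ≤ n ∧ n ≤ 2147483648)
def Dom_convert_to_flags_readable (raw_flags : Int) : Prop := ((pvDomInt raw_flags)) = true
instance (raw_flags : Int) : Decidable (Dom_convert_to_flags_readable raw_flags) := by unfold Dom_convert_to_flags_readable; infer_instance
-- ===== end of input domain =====

-- B replaces A's format-to-binary-string-then-parse approach with direct shift-and-mask bit arithmetic (simpler).


-- ===== PORT A =====
-- A-side helper: the body of A after the mask, on m = raw_flags & 0x3f.
-- format(m, "06b") for m ≥ 0 = binary digits of m zero-padded on the left to width 6 (exact here: m ∈ [0,63]).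
def pvFlagsFromString (m : Int) : List (String × Int) :=
  let s := PySem.Int.toBinChars m
  let bits_string : List Char := List.replicate (6 - s.length) '0' ++ s
  -- int(bit) on a single digit character = its code minus 48 (exact for digit chars)
  let bits : List Int := bits_string.map (fun c => ((c.toNat : Int) - 48))
  [("URG", bits.getD 0 0), ("ACK", bits.getD 1 0), ("PSH", bits.getD 2 0),
   ("RST", bits.getD 3 0), ("SYN", bits.getD 4 0), ("FIN", bits.getD 5 0)]

def convert_to_flags_readable (raw_flags : Int) : List (String × Int) :=
  pvFlagsFromString (PySem.Int.band raw_flags 63)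

-- ===== PORT B =====
-- B-side helper: the dict built by shift-and-mask on f = raw_flags & 0x3F.
def pvFlagsFromBits (f : Int) : List (String × Int) :=
  [("URG", PySem.Int.band (f >>> 5) 1), ("ACK", PySem.Int.band (f >>> 4) 1),
   ("PSH", PySem.Int.band (f >>> 3) 1), ("RST", PySem.Int.band (f >>> 2) 1),
   ("SYN", PySem.Int.band (f >>> 1) 1), ("FIN", PySem.Int.band f 1)]

def convert_to_flags_readable_alt (raw_flags : Int) : List (String × Int) :=
  pvFlagsFromBits (PySem.Int.band raw_flags 63)

-- ===== PRECONDITION & SPEC =====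
def Spec_convert_to_flags_readable (raw_flags : Int) (out : List (String × Int)) : Prop := out = convert_to_flags_readable_alt raw_flags
instance (raw_flags : Int) (out : List (String × Int)) : Decidable (Spec_convert_to_flags_readable raw_flags out) := by unfold Spec_convert_to_flags_readable; infer_instance

-- ===== CLAIM (what is proved, stated in full; the proofs are below) =====
def Claim_equal_convert_to_flags_readable : Prop := ∀ (raw_flags : Int), Dom_convert_to_flags_readable raw_flags → Spec_convert_to_flags_readable raw_flags (convert_to_flags_readable raw_flags)

-- ===== LEMMAS AND PROOFS =====

-- a & 63 lands in [0, 64), for every Int a (two's-complement semantics of band)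
theorem pv_band63_bounds (a : Int) :
    0 ≤ PySem.Int.band a 63 ∧ PySem.Int.band a 63 < 64 := by
  unfold PySem.Int.band
  split_ifs with h1 h2 h3
  · have h : a.toNat &&& Int.toNat 63 ≤ Int.toNat 63 := Nat.and_le_right
    omega
  · omega
  · have h : Int.toNat 63 &&& (-a - 1).toNat ≤ Int.toNat 63 := Nat.and_le_left
    omega
  · omega

-- on the 64 possible masked values the two bodies agree
theorem pv_core (m : Int) (h0 : 0 ≤ m) (h1 : m < 64) :
    pvFlagsFromString m = pvFlagsFromBits m := by
  interval_cases m <;> decide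

-- ===== VERDICT (by name: the statement is the Claim_ definition above) =====
theorem convert_to_flags_readable_spec : Claim_equal_convert_to_flags_readable := by
  intro raw_flags _
  unfold Spec_convert_to_flags_readable convert_to_flags_readable convert_to_flags_readable_alt
  obtain ⟨h0, h1⟩ := pv_band63_bounds raw_flags
  exact pv_core _ h0 h1
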